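-- pv_equiv track=rewrite | github.com/kevin840720/codeforce | 1808C-test.py | calc
-- ===== SOURCE A (Python) =====
-- def lucky(num):
--     num_set = set([int(_) for _ in str(num)])
--     return max(num_set) - min(num_set)
--
-- def calc(a, b):
--     best_luckiness = 999
--     best_number = None
--     for num in range(a, b+1):
--         luckiness = lucky(num)
--         if luckiness < best_luckiness:
--             best_luckiness = luckiness
--             best_number = num
--     return best_number
-- ===== SOURCE B (Python) =====
-- def _spread(n):
--     ds = [int(c) for c in str(n)]
--     return max(ds) - min(ds)
--
-- def calc(a, b):
--     # Two staged passes, no running-best state: first compute the minimal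
--     # digit spread over the range, then return the first number attaining it.
--     if a > b:
--         return None
--     m = min(_spread(n) for n in range(a, b + 1))
--     return next(n for n in range(a, b + 1) if _spread(n) == m)
-- ===== Notes on version B (the rewrite author's own statement) =====
-- stated objective: alternative
-- what changed: B replaces A's single accumulator scan (running best_luckiness/best_number with a 999 sentinel, strict-improvement updates) by two staged passes with no threaded state: pass 1 computes the minimal digit spread over the range with min(), pass 2 returns the first number attaining that minimum with next(); the spread itself is max-min of the digit list, without A's set.
import Mathlib
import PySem

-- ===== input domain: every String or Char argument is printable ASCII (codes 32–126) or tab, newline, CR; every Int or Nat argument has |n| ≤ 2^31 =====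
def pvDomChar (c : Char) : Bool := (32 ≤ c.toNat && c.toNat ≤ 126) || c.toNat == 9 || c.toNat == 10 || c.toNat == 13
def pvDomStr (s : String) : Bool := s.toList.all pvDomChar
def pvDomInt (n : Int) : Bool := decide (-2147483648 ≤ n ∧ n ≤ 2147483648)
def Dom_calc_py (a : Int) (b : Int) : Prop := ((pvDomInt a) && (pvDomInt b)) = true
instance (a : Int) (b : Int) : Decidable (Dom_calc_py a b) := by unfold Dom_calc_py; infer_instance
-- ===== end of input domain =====

-- B replaces A's running-best accumulator scan by two stateless staged passes:
-- min() of the digit spreads over the range, then next() returning the first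
-- number attaining that minimum; the spread is max-min of the digit list (no set).
-- Equivalence is about the RETURN value (neither version mutates anything).

-- ===== PORT A =====
-- lucky(num): set([int(_) for _ in str(num)]); max(...) - min(...).
-- A raised exception (int('-') on negative num) is modelled as `none`.
def calcLuckyA (num : Int) : Option Int :=
  match ((PySem.Int.toStr num).toList).mapM (fun c => PySem.Int.ofStr? (String.ofList [c])) with
  | none => none
  | some l =>
    let numSet : PySem.Set Int := PySem.Set.ofList l
    match PySem.List.max? numSet (fun y => y), PySem.List.min? numSet (fun y => y) with
    | some mx, some mn => some (mx - mn)
    | _, _ => none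

-- one iteration of A's for-loop (state: best_luckiness, best_number; none = raised)
def calcStepA (st : Option (Int × Option Int)) (num : Int) : Option (Int × Option Int) :=
  match st with
  | none => none
  | some (bl, bn) =>
    match calcLuckyA num with
    | none => none
    | some l => if l < bl then some (l, some num) else some (bl, bn)

def calc_py (a : Int) (b : Int) : Option Int :=
  match (PySem.List.pyRange a (b+1) 1).foldl calcStepA
      (some ((999 : Int), (none : Option Int))) with
  | none => none
  | some (_, bn) => bn

-- ===== PORT B =====
-- _spread(n): [int(c) for c in str(n)]; max - min; a raise is modelled as none
def calcSpreadB (num : Int) : Option Int :=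
  match ((PySem.Int.toStr num).toList).mapM (fun c => PySem.Int.ofStr? (String.ofList [c])) with
  | none => none
  | some ds =>
    match PySem.List.max? ds (fun y => y), PySem.List.min? ds (fun y => y) with
    | some mx, some mn => some (mx - mn)
    | _, _ => none

-- pass 1: m = min(_spread(n) for n in range(a, b+1))  (mapM = the generator's
-- successive _spread calls, a raise propagating as none); pass 2:
-- next(n for n in range(a, b+1) if _spread(n) == m)  (next = find?)
def calc_py_alt (a : Int) (b : Int) : Option Int :=
  if a > b then none
  else
    match (PySem.List.pyRange a (b+1) 1).mapM calcSpreadB with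
    | none => none
    | some spreads =>
      match PySem.List.min? spreads (fun y => y) with
      | none => none
      | some m => (PySem.List.pyRange a (b+1) 1).find? (fun n => calcSpreadB n == some m)

-- ===== PRECONDITION & SPEC =====
-- Pre_ excludes exactly the inputs a ≤ b with a < 0, on which A raises
-- ValueError (int('-') on the sign character of a negative number).
def Pre_calc_py (a : Int) (b : Int) : Prop := b < a ∨ 0 ≤ a
instance (a : Int) (b : Int) : Decidable (Pre_calc_py a b) := by unfold Pre_calc_py; infer_instance
def pvWitness_calc_py : Int × Int := (5, 13)

def Spec_calc_py (a : Int) (b : Int) (out : Option Int) : Prop := out = calc_py_alt a b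
instance (a : Int) (b : Int) (out : Option Int) : Decidable (Spec_calc_py a b out) := by unfold Spec_calc_py; infer_instance

-- ===== CLAIM (what is proved, stated in full; the proofs are below) =====
def Claim_equal_calc_py : Prop := ∀ (a : Int) (b : Int), Dom_calc_py a b → Pre_calc_py a b → Spec_calc_py a b (calc_py a b)

-- ===== LEMMAS AND PROOFS =====

-- a character that int() parses to a single decimal digit value
def pvP (c : Char) : Prop :=
  ∃ d : Int, PySem.Int.ofStr? (String.ofList [c]) = some d ∧ 0 ≤ d ∧ d ≤ 9

theorem pvDigitChar_P (k : Nat) (hk : k < 10) : pvP (Nat.digitChar k) := by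
  interval_cases k <;> refine ⟨_, rfl, ?_, ?_⟩ <;> decide

theorem pvToDigitsCore_P : ∀ (f n : Nat) (acc : List Char), (∀ c ∈ acc, pvP c) →
    ∀ c ∈ Nat.toDigitsCore 10 f n acc, pvP c := by
  intro f
  induction f with
  | zero =>
    intro n acc hacc c hc
    simpa [Nat.toDigitsCore] using hacc c (by simpa [Nat.toDigitsCore] using hc)
  | succ f ih =>
    intro n acc hacc c hc
    rw [Nat.toDigitsCore] at hc
    by_cases h0 : n / 10 = 0
    · simp only [h0] at hc
      rcases List.mem_cons.mp (by simpa using hc) with h | h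
      · subst h; exact pvDigitChar_P _ (Nat.mod_lt _ (by norm_num))
      · exact hacc c h
    · simp only [if_neg h0] at hc
      exact ih _ _ (by
        intro c' hc'
        rcases List.mem_cons.mp hc' with h | h
        · subst h; exact pvDigitChar_P _ (Nat.mod_lt _ (by norm_num))
        · exact hacc c' h) c hc

theorem pvToDigitsCore_len : ∀ (f n : Nat) (acc : List Char),
    acc.length ≤ (Nat.toDigitsCore 10 f n acc).length := by
  intro f
  induction f with
  | zero => intro n acc; simp [Nat.toDigitsCore]
  | succ f ih =>
    intro n acc
    rw [Nat.toDigitsCore]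
    by_cases h0 : n / 10 = 0
    · simp [h0]
    · simp only [if_neg h0]
      calc acc.length ≤ (Nat.digitChar (n % 10) :: acc).length := by simp
        _ ≤ _ := ih _ _

theorem pvToDigits_ne_nil (m : Nat) : Nat.toDigits 10 m ≠ [] := by
  intro h
  have hlen := pvToDigitsCore_len m (m / 10) [Nat.digitChar (m % 10)]
  rw [Nat.toDigits, Nat.toDigitsCore] at h
  by_cases h0 : m / 10 = 0
  · simp [h0] at h
  · simp only [if_neg h0] at h
    rw [h] at hlen; simp at hlen

theorem pvMapM_P : ∀ (cs : List Char), (∀ c ∈ cs, pvP c) →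
    ∃ ds : List Int,
      cs.mapM (fun c => PySem.Int.ofStr? (String.ofList [c])) = some ds ∧
      ds.length = cs.length ∧ ∀ d ∈ ds, 0 ≤ d ∧ d ≤ 9 := by
  intro cs
  induction cs with
  | nil => intro _; exact ⟨[], by simp, by simp, by simp⟩
  | cons c cs ih =>
    intro h
    obtain ⟨d, hd, hd0, hd9⟩ := h c List.mem_cons_self
    obtain ⟨ds, hds, hlen, hbnd⟩ := ih (fun c' hc' => h c' (List.mem_cons_of_mem _ hc'))
    have hd' : PySem.Int.ofChars? [c] = some d := by simpa [PySem.Int.ofStr?] using hd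
    have hds' : cs.mapM (fun c => PySem.Int.ofChars? [c]) = some ds := by
      simpa [PySem.Int.ofStr?] using hds
    refine ⟨d :: ds, ?_, by simp [hlen], ?_⟩
    · simp [List.mapM_cons, PySem.Int.ofStr?, hd', hds']
    · intro x hx
      rcases List.mem_cons.mp hx with h | h
      · subst h; exact ⟨hd0, hd9⟩
      · exact hbnd x h

-- max/min over set(l) equal max/min over l (same membership, antisymmetry)
theorem pvMaxMin_set (l : List Int) (hl : l ≠ []) :
    PySem.List.max? (PySem.Set.ofList l) (fun y => y) = PySem.List.max? l (fun y => y) ∧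
    PySem.List.min? (PySem.Set.ofList l) (fun y => y) = PySem.List.min? l (fun y => y) := by
  obtain ⟨x, hx⟩ := List.exists_mem_of_ne_nil l hl
  have hxS : x ∈ PySem.Set.ofList l := (PySem.Set.mem_ofList _ _).mpr hx
  have hSne : (PySem.Set.ofList l : List Int) ≠ [] := List.ne_nil_of_mem hxS
  cases hms : PySem.List.max? (PySem.Set.ofList l) (fun y => y) with
  | none => exact absurd ((PySem.List.max?_eq_none_iff _ _).mp hms) hSne
  | some mS =>
    cases hml : PySem.List.max? l (fun y => y) with
    | none => exact absurd ((PySem.List.max?_eq_none_iff _ _).mp hml) hl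
    | some mL =>
      cases hns : PySem.List.min? (PySem.Set.ofList l) (fun y => y) with
      | none => exact absurd ((PySem.List.min?_eq_none_iff _ _).mp hns) hSne
      | some nS =>
        cases hnl : PySem.List.min? l (fun y => y) with
        | none => exact absurd ((PySem.List.min?_eq_none_iff _ _).mp hnl) hl
        | some nL =>
          have hmSl : mS ∈ l := (PySem.Set.mem_ofList _ _).mp (PySem.List.max?_mem hms)
          have hmLS : mL ∈ PySem.Set.ofList l :=
            (PySem.Set.mem_ofList _ _).mpr (PySem.List.max?_mem hml)
          have h1 : mS ≤ mL := PySem.List.max?_isMax hml mS hmSl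
          have h2 : mL ≤ mS := PySem.List.max?_isMax hms mL hmLS
          have hnSl : nS ∈ l := (PySem.Set.mem_ofList _ _).mp (PySem.List.min?_mem hns)
          have hnLS : nL ∈ PySem.Set.ofList l :=
            (PySem.Set.mem_ofList _ _).mpr (PySem.List.min?_mem hnl)
          have h3 : nS ≤ nL := PySem.List.min?_isMin hns nL hnLS
          have h4 : nL ≤ nS := PySem.List.min?_isMin hnl nS hnSl
          exact ⟨congrArg some (le_antisymm h1 h2), congrArg some (le_antisymm h3 h4)⟩

-- for 0 ≤ n, both digit-spread helpers return the same value v with 0 ≤ v ≤ 9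
theorem pvLucky_spec (n : Int) (hn : 0 ≤ n) :
    ∃ v, calcLuckyA n = some v ∧ calcSpreadB n = some v ∧ 0 ≤ v ∧ v ≤ 9 := by
  have hchars : (PySem.Int.toStr n).toList = Nat.toDigits 10 n.toNat := by
    rw [PySem.Int.toList_toStr, PySem.Int.toChars, if_neg (by omega)]
  have hP : ∀ c ∈ (PySem.Int.toStr n).toList, pvP c := by
    rw [hchars, Nat.toDigits]
    exact pvToDigitsCore_P _ _ [] (by simp)
  obtain ⟨ds, hds, hlen, hbnd⟩ := pvMapM_P _ hP
  have hdsne : ds ≠ [] := by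
    intro h
    apply pvToDigits_ne_nil n.toNat
    have : ((PySem.Int.toStr n).toList).length = 0 := by rw [← hlen, h]; rfl
    rw [hchars] at this
    exact List.eq_nil_of_length_eq_zero this
  obtain ⟨hmaxeq, hmineq⟩ := pvMaxMin_set ds hdsne
  cases hml : PySem.List.max? ds (fun y => y) with
  | none => exact absurd ((PySem.List.max?_eq_none_iff _ _).mp hml) hdsne
  | some mx =>
    cases hnl : PySem.List.min? ds (fun y => y) with
    | none => exact absurd ((PySem.List.min?_eq_none_iff _ _).mp hnl) hdsne
    | some mn =>
      have hmxmem := PySem.List.max?_mem hml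
      have hmnmem := PySem.List.min?_mem hnl
      have hmx9 : mx ≤ 9 := (hbnd mx hmxmem).2
      have hmn0 : 0 ≤ mn := (hbnd mn hmnmem).1
      have hmnmx : mn ≤ mx := PySem.List.min?_isMin hnl mx hmxmem
      refine ⟨mx - mn, ?_, ?_, by omega, by omega⟩
      · unfold calcLuckyA
        rw [hds]
        simp only [hmaxeq, hmineq, hml, hnl]
      · unfold calcSpreadB
        rw [hds]
        simp only [hml, hnl]

-- the spread value as a total function (proof-side only)
def pvSpread (x : Int) : Int := (calcSpreadB x).getD 0

-- first argmin of the spread over a list (proof-side characterisation)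
def pvFirstMin : List Int → Option (Int × Int)
  | [] => none
  | x :: xs =>
    match pvFirstMin xs with
    | none => some (pvSpread x, x)
    | some p => if pvSpread x ≤ p.1 then some (pvSpread x, x) else some p

theorem pvFirstMin_isSome (x : Int) (xs : List Int) :
    ∃ p, pvFirstMin (x :: xs) = some p := by
  cases hfm : pvFirstMin xs with
  | none => exact ⟨(pvSpread x, x), by simp [pvFirstMin, hfm]⟩
  | some p =>
    by_cases h : pvSpread x ≤ p.1
    · exact ⟨(pvSpread x, x), by simp [pvFirstMin, hfm, h]⟩
    · exact ⟨p, by simp [pvFirstMin, hfm, h]⟩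

-- the winner is a member and carries its own spread
theorem pvFirstMin_mem : ∀ (L : List Int) (p : Int × Int), pvFirstMin L = some p →
    p.2 ∈ L ∧ pvSpread p.2 = p.1 := by
  intro L
  induction L with
  | nil => intro p hp; simp [pvFirstMin] at hp
  | cons x xs ih =>
    intro p hp
    cases hfm : pvFirstMin xs with
    | none =>
      simp [pvFirstMin, hfm] at hp
      rw [← hp]; exact ⟨List.mem_cons_self, rfl⟩
    | some q =>
      by_cases hle : pvSpread x ≤ q.1
      · simp [pvFirstMin, hfm, hle] at hp
        rw [← hp]; exact ⟨List.mem_cons_self, rfl⟩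
      · simp [pvFirstMin, hfm, hle] at hp
        obtain ⟨h1, h2⟩ := ih q hfm
        rw [← hp]; exact ⟨List.mem_cons_of_mem _ h1, h2⟩

-- the winner's spread is a lower bound for all spreads in the list
theorem pvFirstMin_lb : ∀ (L : List Int) (p : Int × Int), pvFirstMin L = some p →
    ∀ y ∈ L, p.1 ≤ pvSpread y := by
  intro L
  induction L with
  | nil => intro p hp; simp [pvFirstMin] at hp
  | cons x xs ih =>
    intro p hp y hy
    cases hfm : pvFirstMin xs with
    | none =>
      have hxs : xs = [] := by
        cases xs with
        | nil => rfl
        | cons z zs => obtain ⟨q, hq⟩ := pvFirstMin_isSome z zs; rw [hq] at hfm; cases hfm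
      subst hxs
      simp [pvFirstMin] at hp
      rcases List.mem_cons.mp hy with h | h
      · subst h; rw [← hp]
      · cases h
    | some q =>
      by_cases hle : pvSpread x ≤ q.1
      · simp [pvFirstMin, hfm, hle] at hp
        rcases List.mem_cons.mp hy with h | h
        · subst h; rw [← hp]
        · have := ih q hfm y h; rw [← hp]; simp only []; omega
      · simp [pvFirstMin, hfm, hle] at hp
        rcases List.mem_cons.mp hy with h | h
        · subst h; rw [← hp]; omega
        · rw [← hp]; exact ih q hfm y h

theorem pvFirstMin_fst_le (L : List Int) (h : ∀ n ∈ L, pvSpread n ≤ 9) :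
    ∀ p, pvFirstMin L = some p → p.1 ≤ 9 := by
  intro p hp
  obtain ⟨hm, hs⟩ := pvFirstMin_mem L p hp
  rw [← hs]; exact h p.2 hm

-- B's second pass: the winner is the FIRST element attaining the spread p.1
theorem pvFirstMin_find : ∀ (L : List Int),
    (∀ n ∈ L, calcSpreadB n = some (pvSpread n)) →
    ∀ (p : Int × Int), pvFirstMin L = some p →
    L.find? (fun n => calcSpreadB n == some p.1) = some p.2 := by
  intro L
  induction L with
  | nil => intro _ p hp; simp [pvFirstMin] at hp
  | cons x xs ih =>
    intro h p hp
    have hx := h x List.mem_cons_self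
    cases hfm : pvFirstMin xs with
    | none =>
      simp [pvFirstMin, hfm] at hp
      rw [← hp]
      simp [List.find?_cons, hx]
    | some q =>
      by_cases hle : pvSpread x ≤ q.1
      · simp [pvFirstMin, hfm, hle] at hp
        rw [← hp]
        simp [List.find?_cons, hx]
      · simp [pvFirstMin, hfm, hle] at hp
        rw [← hp]
        have hfalse : (calcSpreadB x == some q.1) = false := by
          rw [hx]
          simp only [beq_eq_false_iff_ne, ne_eq, Option.some.injEq]
          omega
        simp only [List.find?_cons, hfalse, cond_false]
        exact ih (fun n hn => h n (List.mem_cons_of_mem _ hn)) q hfm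

-- mapM over all-defined spreads is the plain map
theorem pvMapM_spread : ∀ (L : List Int),
    (∀ n ∈ L, calcSpreadB n = some (pvSpread n)) →
    L.mapM calcSpreadB = some (L.map pvSpread) := by
  intro L
  induction L with
  | nil => intro _; rfl
  | cons x xs ih =>
    intro h
    rw [List.mapM_cons, h x List.mem_cons_self,
      ih (fun n hn => h n (List.mem_cons_of_mem _ hn))]
    rfl

-- A's forward loop, from an arbitrary accumulator, in terms of pvFirstMin
theorem pvAfold : ∀ (L : List Int), (∀ n ∈ L, calcLuckyA n = some (pvSpread n)) →
    ∀ (bl : Int) (bn : Option Int),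
    L.foldl calcStepA (some (bl, bn)) =
      some (match pvFirstMin L with
            | none => (bl, bn)
            | some p => if p.1 < bl then (p.1, some p.2) else (bl, bn)) := by
  intro L
  induction L with
  | nil => intro _ bl bn; simp [pvFirstMin]
  | cons x xs ih =>
    intro h bl bn
    have hx := h x List.mem_cons_self
    have hrest := ih (fun n hn => h n (List.mem_cons_of_mem _ hn))
    by_cases hlt : pvSpread x < bl
    · have hstep : calcStepA (some (bl, bn)) x = some (pvSpread x, some x) := by
        simp [calcStepA, hx, hlt]
      rw [List.foldl_cons, hstep, hrest]
      cases hfm : pvFirstMin xs with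
      | none => simp [pvFirstMin, hfm, hlt]
      | some p =>
        by_cases h2 : pvSpread x ≤ p.1
        · have h3 : ¬ p.1 < pvSpread x := by omega
          simp [pvFirstMin, hfm, h2, h3, hlt]
        · have h3 : p.1 < pvSpread x := by omega
          have h4 : p.1 < bl := by omega
          simp [pvFirstMin, hfm, h2, h3, h4]
    · have hstep : calcStepA (some (bl, bn)) x = some (bl, bn) := by
        simp [calcStepA, hx, hlt]
      rw [List.foldl_cons, hstep, hrest]
      cases hfm : pvFirstMin xs with
      | none => simp [pvFirstMin, hfm, hlt]
      | some p =>
        by_cases h2 : pvSpread x ≤ p.1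
        · have h3 : ¬ p.1 < bl := by omega
          simp [pvFirstMin, hfm, h2, h3, hlt]
        · simp [pvFirstMin, hfm, h2]

-- ===== VERDICT (by name: the statement is the Claim_ definition above) =====
theorem calc_py_spec : Claim_equal_calc_py := by
  unfold Claim_equal_calc_py
  intro a b _ hpre
  unfold Spec_calc_py
  by_cases hba : b < a
  · have h1 : PySem.List.pyRange a (b+1) 1 = [] := PySem.List.pyRange_one_eq_nil (by omega)
    simp [calc_py, calc_py_alt, h1, show a > b from hba]
  · have ha : 0 ≤ a := hpre.resolve_left hba
    set L := PySem.List.pyRange a (b+1) 1 with hL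
    have hmem : ∀ n ∈ L, 0 ≤ n := by
      intro n hn
      have hn' : n ∈ PySem.List.pyRange a (b+1) 1 := hL ▸ hn
      have := PySem.List.mem_pyRange_one.mp hn'
      omega
    have hA : ∀ n ∈ L, calcLuckyA n = some (pvSpread n) := by
      intro n hn
      obtain ⟨v, h1, h2, _, _⟩ := pvLucky_spec n (hmem n hn)
      rw [h1]; simp [pvSpread, h2]
    have hB : ∀ n ∈ L, calcSpreadB n = some (pvSpread n) := by
      intro n hn
      obtain ⟨v, h1, h2, _, _⟩ := pvLucky_spec n (hmem n hn)
      rw [h2]; simp [pvSpread, h2]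
    have hbound : ∀ n ∈ L, pvSpread n ≤ 9 := by
      intro n hn
      obtain ⟨v, h1, h2, _, h9⟩ := pvLucky_spec n (hmem n hn)
      simp only [pvSpread, h2, Option.getD_some]; exact h9
    have hcons : L = a :: PySem.List.pyRange (a+1) (b+1) 1 := by
      rw [hL]; exact PySem.List.pyRange_one_cons (by omega)
    obtain ⟨p, hp⟩ : ∃ p, pvFirstMin L = some p := by
      rw [hcons]; exact pvFirstMin_isSome _ _
    have hl9 : p.1 ≤ 9 := pvFirstMin_fst_le L hbound p hp
    have hAres : L.foldl calcStepA (some ((999 : Int), (none : Option Int)))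
        = some (p.1, some p.2) := by
      rw [pvAfold L hA 999 none, hp]
      simp [show p.1 < (999 : Int) by omega]
    have e1 : calc_py a b = some p.2 := by
      unfold calc_py
      rw [← hL, hAres]
    -- B side
    have hmapm : L.mapM calcSpreadB = some (L.map pvSpread) := pvMapM_spread L hB
    obtain ⟨hpmem, hpsp⟩ := pvFirstMin_mem L p hp
    have hmapne : L.map pvSpread ≠ [] := by
      rw [hcons]; simp
    have hmin : PySem.List.min? (L.map pvSpread) (fun y => y) = some p.1 := by
      cases hm : PySem.List.min? (L.map pvSpread) (fun y => y) with
      | none => exact absurd ((PySem.List.min?_eq_none_iff _ _).mp hm) hmapne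
      | some m' =>
        obtain ⟨y, hy, hym⟩ := List.mem_map.mp (PySem.List.min?_mem hm)
        have h1 : p.1 ≤ m' := by rw [← hym]; exact pvFirstMin_lb L p hp y hy
        have h2 : m' ≤ p.1 := by
          have : p.1 ∈ L.map pvSpread := List.mem_map.mpr ⟨p.2, hpmem, hpsp⟩
          exact PySem.List.min?_isMin hm p.1 this
        exact congrArg some (le_antisymm h2 h1)
    have hfind : L.find? (fun n => calcSpreadB n == some p.1) = some p.2 :=
      pvFirstMin_find L hB p hp
    have e2 : calc_py_alt a b = some p.2 := by
      unfold calc_py_alt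
      rw [if_neg (by omega), ← hL, hmapm]
      simp only [hmin, hfind]
    rw [e1, e2]
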